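-- pv_equiv track=rewrite | github.com/KarelAppelsap/BarcadoDashboard | streamlit_app.py | stable_domain
-- ===== SOURCE A (Python) =====
-- from typing import List, Optional, Dict
--
-- def stable_domain(states: List[str]) -> List[str]:
--     uniq = sorted(set(states))
--     ordered: List[str] = []
--     for first in ["MainMenu", "Screensaver"]:
--         if first in uniq:
--             uniq.remove(first)
--             ordered.append(first)
--     # INACTIVE graag als laatste
--     if "INACTIVE" in uniq:
--         uniq.remove("INACTIVE")
--         ordered.extend(uniq)
--         ordered.append("INACTIVE")
--     else:
--         ordered.extend(uniq)
--     return ordered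
-- ===== SOURCE B (Python) =====
-- from typing import List
--
--
-- def stable_domain(states: List[str]) -> List[str]:
--     order = {"MainMenu": 0, "Screensaver": 1, "INACTIVE": 3}
--     return sorted(sorted(set(states)), key=lambda s: order.get(s, 2))
-- ===== Notes on version B (the rewrite author's own statement) =====
-- stated objective: idiomatic
-- what changed: A sorts the deduplicated states and then reshuffles with membership tests, list.remove and re-appends; B expresses the whole ordering as one stable sort keyed by a rank dict ({'MainMenu':0,'Screensaver':1,'INACTIVE':3}, default 2) over the alphabetically sorted unique states, so the remove/reorder loop disappears.
import Mathlib
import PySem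

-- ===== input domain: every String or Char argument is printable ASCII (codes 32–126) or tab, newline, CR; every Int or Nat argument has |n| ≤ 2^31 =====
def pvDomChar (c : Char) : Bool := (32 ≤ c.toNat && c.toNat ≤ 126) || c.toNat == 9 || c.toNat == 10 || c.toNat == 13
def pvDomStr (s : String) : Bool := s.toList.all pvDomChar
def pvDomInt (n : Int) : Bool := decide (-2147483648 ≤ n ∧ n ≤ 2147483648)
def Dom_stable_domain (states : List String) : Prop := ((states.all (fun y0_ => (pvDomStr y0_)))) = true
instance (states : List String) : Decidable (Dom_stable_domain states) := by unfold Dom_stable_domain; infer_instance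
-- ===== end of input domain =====

-- B replaces A's sort-then-remove/reappend reshuffle by one stable key-driven sort
-- (rank dict, then sorted(sorted(set(states)), key=rank)); objective: idiomatic.

-- ===== PORT A =====
def stable_domain (states : List String) : List String :=
  let uniq0 := PySem.List.sorted (PySem.Set.ofList states) (fun x => x) false
  let p := ["MainMenu", "Screensaver"].foldl
    (fun (p : List String × List String) first =>
      if first ∈ p.1 then (((PySem.List.remove? p.1 first).getD p.1), p.2 ++ [first])
      else p)
    (uniq0, [])
  if "INACTIVE" ∈ p.1 then
    (p.2 ++ ((PySem.List.remove? p.1 "INACTIVE").getD p.1)) ++ ["INACTIVE"]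
  else p.2 ++ p.1

-- ===== PORT B =====
-- order = {"MainMenu": 0, "Screensaver": 1, "INACTIVE": 3}
def pvOrder : PySem.Dict String Int :=
  (((PySem.Dict.empty).insert "MainMenu" 0).insert "Screensaver" 1).insert "INACTIVE" 3

def stable_domain_alt (states : List String) : List String :=
  PySem.List.sorted (PySem.List.sorted (PySem.Set.ofList states) (fun x => x) false)
    (fun s => pvOrder.getD s 2) false

-- ===== PRECONDITION & SPEC =====
def Spec_stable_domain (states : List String) (out : List String) : Prop := out = stable_domain_alt states
instance (states : List String) (out : List String) : Decidable (Spec_stable_domain states out) := by unfold Spec_stable_domain; infer_instance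

-- ===== CLAIM (what is proved, stated in full; the proofs are below) =====
def Claim_equal_stable_domain : Prop := ∀ (states : List String), Dom_stable_domain states → Spec_stable_domain states (stable_domain states)

-- ===== LEMMAS AND PROOFS =====

-- the rank that pvOrder.getD computes, as an if-chain
def rnk (s : String) : Int :=
  if s = "MainMenu" then 0 else if s = "Screensaver" then 1 else if s = "INACTIVE" then 3 else 2

lemma key_eq (s : String) : pvOrder.getD s 2 = rnk s := by
  unfold rnk
  split_ifs with h1 h2 h3 <;>
    simp_all [pvOrder, PySem.Dict.getD_insert, PySem.Dict.getD_empty]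

-- bucket i of a list: its elements of rank i, in order
def buck (i : Int) (u : List String) : List String := u.filter (fun s => decide (rnk s = i))

lemma rnk_cases (s : String) : rnk s = 0 ∨ rnk s = 1 ∨ rnk s = 2 ∨ rnk s = 3 := by
  unfold rnk; split_ifs <;> simp

lemma rnk0_iff (s : String) : rnk s = 0 ↔ s = "MainMenu" := by
  unfold rnk; split_ifs <;> simp_all
lemma rnk1_iff (s : String) : rnk s = 1 ↔ s = "Screensaver" := by
  unfold rnk; split_ifs <;> simp_all
lemma rnk3_iff (s : String) : rnk s = 3 ↔ s = "INACTIVE" := by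
  unfold rnk; split_ifs <;> simp_all
lemma rnk2_iff (s : String) : rnk s = 2 ↔ (s ≠ "MainMenu" ∧ s ≠ "Screensaver" ∧ s ≠ "INACTIVE") := by
  unfold rnk; split_ifs <;> simp_all

lemma insertBy_middle {α : Type} (before : α → α → Bool) (x : α) :
    ∀ (ys zs : List α), (∀ y ∈ ys, before x y = false) → (∀ z ∈ zs, before x z = true) →
      PySem.List.insertBy before x (ys ++ zs) = ys ++ x :: zs := by
  intro ys
  induction ys with
  | nil =>
    intro zs _ hz
    cases zs with
    | nil => simp [PySem.List.insertBy]
    | cons z zs => simp [PySem.List.insertBy, hz z (by simp)]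
  | cons y ys ih =>
    intro zs hy hz
    simp [PySem.List.insertBy, hy y (by simp), ih zs (fun a ha => hy a (by simp [ha])) hz]

lemma mem_buck {i : Int} {u : List String} {y : String} (h : y ∈ buck i u) : rnk y = i := by
  unfold buck at h
  simpa using (List.mem_filter.mp h).2

lemma buck_append (i : Int) (u : List String) (x : String) :
    buck i (u ++ [x]) = buck i u ++ (if rnk x = i then [x] else []) := by
  unfold buck; simp [List.filter_append]; split_ifs <;> simp_all

lemma before_eq (x y : String) :
    (decide (pvOrder.getD x 2 < pvOrder.getD y 2)) = decide (rnk x < rnk y) := by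
  rw [key_eq, key_eq]

-- the stable sort by rank is the concatenation of the four rank buckets
lemma sorted_buckets (u : List String) :
    PySem.List.sorted u (fun s => pvOrder.getD s 2) false
      = buck 0 u ++ buck 1 u ++ buck 2 u ++ buck 3 u := by
  rw [PySem.List.sorted_eq_foldl_insertBy]
  induction u using List.reverseRecOn with
  | nil => simp [buck]
  | append_singleton u x ih =>
    rw [List.foldl_append, List.foldl_cons, List.foldl_nil, ih]
    have hlt : ∀ (i : Int), rnk x < i → ∀ y ∈ buck i u,
        (decide (pvOrder.getD x 2 < pvOrder.getD y 2)) = true := by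
      intro i hi y hy; rw [before_eq, mem_buck hy]; simpa using hi
    have hge : ∀ (i : Int), i ≤ rnk x → ∀ y ∈ buck i u,
        (decide (pvOrder.getD x 2 < pvOrder.getD y 2)) = false := by
      intro i hi y hy; rw [before_eq, mem_buck hy]; simpa using hi
    rcases rnk_cases x with hr | hr | hr | hr
    · rw [show buck 0 u ++ buck 1 u ++ buck 2 u ++ buck 3 u
            = buck 0 u ++ (buck 1 u ++ buck 2 u ++ buck 3 u) by simp [List.append_assoc],
          insertBy_middle _ x _ _ (hge 0 (by omega))
            (by intro z hz
                rcases List.mem_append.mp hz with hz | hz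
                · rcases List.mem_append.mp hz with hz | hz
                  · exact hlt 1 (by omega) z hz
                  · exact hlt 2 (by omega) z hz
                · exact hlt 3 (by omega) z hz)]
      simp [buck_append, hr, List.append_assoc]
    · rw [show buck 0 u ++ buck 1 u ++ buck 2 u ++ buck 3 u
            = (buck 0 u ++ buck 1 u) ++ (buck 2 u ++ buck 3 u) by simp [List.append_assoc],
          insertBy_middle _ x _ _
            (by intro y hy
                rcases List.mem_append.mp hy with hy | hy
                · exact hge 0 (by omega) y hy
                · exact hge 1 (by omega) y hy)
            (by intro z hz
                rcases List.mem_append.mp hz with hz | hz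
                · exact hlt 2 (by omega) z hz
                · exact hlt 3 (by omega) z hz)]
      simp [buck_append, hr, List.append_assoc]
    · rw [show buck 0 u ++ buck 1 u ++ buck 2 u ++ buck 3 u
            = (buck 0 u ++ buck 1 u ++ buck 2 u) ++ buck 3 u by simp [List.append_assoc],
          insertBy_middle _ x _ _
            (by intro y hy
                rcases List.mem_append.mp hy with hy | hy
                · rcases List.mem_append.mp hy with hy | hy
                  · exact hge 0 (by omega) y hy
                  · exact hge 1 (by omega) y hy
                · exact hge 2 (by omega) y hy)
            (by intro z hz; exact hlt 3 (by omega) z hz)]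
      simp [buck_append, hr, List.append_assoc]
    · rw [show buck 0 u ++ buck 1 u ++ buck 2 u ++ buck 3 u
            = (buck 0 u ++ buck 1 u ++ buck 2 u ++ buck 3 u) ++ [] by simp,
          insertBy_middle _ x _ _
            (by intro y hy
                rcases List.mem_append.mp hy with hy | hy
                · rcases List.mem_append.mp hy with hy | hy
                  · rcases List.mem_append.mp hy with hy | hy
                    · exact hge 0 (by omega) y hy
                    · exact hge 1 (by omega) y hy
                  · exact hge 2 (by omega) y hy
                · exact hge 3 (by omega) y hy)
            (by intro z hz; simp at hz)]
      simp [buck_append, hr, List.append_assoc]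

lemma filter_eq_of_nodup (u : List String) (hu : u.Nodup) (a : String) :
    u.filter (fun s => decide (s = a)) = if a ∈ u then [a] else [] := by
  induction u with
  | nil => simp
  | cons x u ih =>
    rcases List.nodup_cons.mp hu with ⟨hx, hu2⟩
    by_cases hxa : x = a
    · subst hxa
      simp [ih hu2, hx]
    · simp [hxa, ih hu2, Ne.symm hxa]

-- the value-side of A's fold on a nodup list equals the same buckets
lemma A_tail (u : List String) (hu : u.Nodup) :
    (let p := ["MainMenu", "Screensaver"].foldl
        (fun (p : List String × List String) first =>
          if first ∈ p.1 then (((PySem.List.remove? p.1 first).getD p.1), p.2 ++ [first])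
          else p)
        (u, ([] : List String))
      if "INACTIVE" ∈ p.1 then
        (p.2 ++ ((PySem.List.remove? p.1 "INACTIVE").getD p.1)) ++ ["INACTIVE"]
      else p.2 ++ p.1)
      = buck 0 u ++ buck 1 u ++ buck 2 u ++ buck 3 u := by
  have bM : buck 0 u = if "MainMenu" ∈ u then ["MainMenu"] else [] := by
    rw [show buck 0 u = u.filter (fun s => decide (s = "MainMenu")) from
      List.filter_congr (fun s _ => by simp [rnk0_iff])]
    exact filter_eq_of_nodup u hu _
  have bS : buck 1 u = if "Screensaver" ∈ u then ["Screensaver"] else [] := by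
    rw [show buck 1 u = u.filter (fun s => decide (s = "Screensaver")) from
      List.filter_congr (fun s _ => by simp [rnk1_iff])]
    exact filter_eq_of_nodup u hu _
  have bI : buck 3 u = if "INACTIVE" ∈ u then ["INACTIVE"] else [] := by
    rw [show buck 3 u = u.filter (fun s => decide (s = "INACTIVE")) from
      List.filter_congr (fun s _ => by simp [rnk3_iff])]
    exact filter_eq_of_nodup u hu _
  have key : ((u.erase "MainMenu").erase "Screensaver").erase "INACTIVE" = buck 2 u := by
    rw [((hu.erase _).erase _).erase_eq_filter, (hu.erase _).erase_eq_filter,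
        hu.erase_eq_filter, List.filter_filter, List.filter_filter]
    exact List.filter_congr (fun s _ => by
      by_cases h1 : s = "MainMenu" <;> by_cases h2 : s = "Screensaver" <;>
        by_cases h3 : s = "INACTIVE" <;> simp [buck, rnk2_iff, h1, h2, h3])
  simp only [List.foldl_cons, List.foldl_nil]
  by_cases hM : "MainMenu" ∈ u
  · rw [if_pos hM, PySem.List.remove?_eq_some_erase u _ hM, Option.getD_some]
    by_cases hS : "Screensaver" ∈ u
    · have hS' : "Screensaver" ∈ u.erase "MainMenu" :=
        (List.mem_erase_of_ne (by decide)).mpr hS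
      rw [if_pos hS', PySem.List.remove?_eq_some_erase _ _ hS', Option.getD_some]
      by_cases hI : "INACTIVE" ∈ u
      · have hI' : "INACTIVE" ∈ (u.erase "MainMenu").erase "Screensaver" :=
          (List.mem_erase_of_ne (by decide)).mpr ((List.mem_erase_of_ne (by decide)).mpr hI)
        rw [if_pos hI', PySem.List.remove?_eq_some_erase _ _ hI', Option.getD_some,
            key, bM, bS, bI, if_pos hM, if_pos hS, if_pos hI]
        all_goals simp [List.append_assoc]
      · have hI' : "INACTIVE" ∉ (u.erase "MainMenu").erase "Screensaver" := fun h =>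
          hI (List.mem_of_mem_erase (List.mem_of_mem_erase h))
        rw [List.erase_of_not_mem hI'] at key
        rw [if_neg hI', key, bM, bS, bI, if_pos hM, if_pos hS, if_neg hI]
        all_goals simp [List.append_assoc]
    · have hS' : "Screensaver" ∉ u.erase "MainMenu" := fun h => hS (List.mem_of_mem_erase h)
      rw [if_neg hS']
      by_cases hI : "INACTIVE" ∈ u
      · have hI' : "INACTIVE" ∈ u.erase "MainMenu" :=
          (List.mem_erase_of_ne (by decide)).mpr hI
        rw [List.erase_of_not_mem hS'] at key
        rw [if_pos hI', PySem.List.remove?_eq_some_erase _ _ hI', Option.getD_some,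
            key, bM, bS, bI, if_pos hM, if_neg hS, if_pos hI]
        all_goals simp [List.append_assoc]
      · have hI' : "INACTIVE" ∉ u.erase "MainMenu" := fun h => hI (List.mem_of_mem_erase h)
        rw [List.erase_of_not_mem hS', List.erase_of_not_mem hI'] at key
        rw [if_neg hI', key, bM, bS, bI, if_pos hM, if_neg hS, if_neg hI]
        all_goals simp [List.append_assoc]
  · rw [if_neg hM]
    by_cases hS : "Screensaver" ∈ u
    · rw [if_pos hS, PySem.List.remove?_eq_some_erase u _ hS, Option.getD_some]
      by_cases hI : "INACTIVE" ∈ u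
      · have hI' : "INACTIVE" ∈ u.erase "Screensaver" :=
          (List.mem_erase_of_ne (by decide)).mpr hI
        rw [List.erase_of_not_mem hM] at key
        rw [if_pos hI', PySem.List.remove?_eq_some_erase _ _ hI', Option.getD_some,
            key, bM, bS, bI, if_neg hM, if_pos hS, if_pos hI]
      · have hI' : "INACTIVE" ∉ u.erase "Screensaver" := fun h => hI (List.mem_of_mem_erase h)
        rw [List.erase_of_not_mem hM, List.erase_of_not_mem hI'] at key
        rw [if_neg hI', key, bM, bS, bI, if_neg hM, if_pos hS, if_neg hI]
        all_goals simp [List.append_assoc]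
    · rw [if_neg hS]
      by_cases hI : "INACTIVE" ∈ u
      · rw [List.erase_of_not_mem hM, List.erase_of_not_mem hS] at key
        rw [if_pos hI, PySem.List.remove?_eq_some_erase u _ hI, Option.getD_some,
            key, bM, bS, bI, if_neg hM, if_neg hS, if_pos hI]
        all_goals simp [List.append_assoc]
      · rw [List.erase_of_not_mem hM, List.erase_of_not_mem hS, List.erase_of_not_mem hI] at key
        rw [if_neg hI, ← key, bM, bS, bI, if_neg hM, if_neg hS, if_neg hI]
        all_goals simp [List.append_assoc]

-- ===== VERDICT (by name: the statement is the Claim_ definition above) =====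
theorem stable_domain_spec : Claim_equal_stable_domain := by
  intro states _
  unfold Spec_stable_domain stable_domain stable_domain_alt
  have hp := PySem.List.sorted_ofList_pairwise_lt (κ := String) states
  generalize hU : PySem.List.sorted (PySem.Set.ofList states) (fun x => x) false = u at *
  have hu : u.Nodup := hp.imp (fun h => ne_of_lt h)
  rw [sorted_buckets]
  exact A_tail u hu
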